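-- pv_equiv track=rewrite | github.com/deanmoses/svel-djang | backend/apps/catalog/api/edit_claims.py | _normalize_abbreviations
-- ===== SOURCE A (Python) =====
-- from typing import NoReturn
--
-- class StructuredValidationError(Exception):
--     """Validation error with separate field-level and form-level messages.
--
--     Raised by claim-editing helpers and caught by a custom exception
--     handler in ``config/api.py`` that returns a 422 JSON response:
--
--     .. code-block:: json
--
--         {
--             "detail": {
--                 "message": "summary",
--                 "field_errors": {"year": "Must be ≤ 2100."},
--                 "form_errors": ["No changes provided."]
--             }
--         }
--     """
--
--     def __init__(
--         self,
--         *,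
--         message: str,
--         field_errors: dict[str, str] | None = None,
--         form_errors: list[str] | None = None,
--     ) -> None:
--         self.message = message
--         self.field_errors = field_errors or {}
--         self.form_errors = form_errors or []
--         super().__init__(message)
--
--     def to_response_body(self) -> dict:
--         return {
--             "message": self.message,
--             "field_errors": self.field_errors,
--             "form_errors": self.form_errors,
--         }
--
-- def raise_form_error(message: str) -> NoReturn:
--     """Raise a structured 422 for a form-level (non-field) error."""
--     raise StructuredValidationError(
--         message=message,
--         form_errors=[message],
--     )
--
-- def _normalize_abbreviations(values: list[str]) -> list[str]:
--     """Strip, deduplicate, drop blanks, enforce max length."""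
--     normalized: list[str] = []
--     seen: set[str] = set()
--     for raw_value in values:
--         value = raw_value.strip()
--         if not value:
--             continue
--         if len(value) > 50:
--             raise_form_error("Abbreviations must be 50 characters or fewer.")
--         if value in seen:
--             continue
--         seen.add(value)
--         normalized.append(value)
--     return normalized
-- ===== SOURCE B (Python) =====
-- from typing import NoReturn
--
--
-- class StructuredValidationError(Exception):
--     def __init__(self, *, message, field_errors=None, form_errors=None):
--         self.message = message
--         self.field_errors = field_errors or {}
--         self.form_errors = form_errors or []
--         super().__init__(message)
--
--
-- def raise_form_error(message: str) -> NoReturn: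
--     raise StructuredValidationError(message=message, form_errors=[message])
--
--
-- def _normalize_abbreviations(values: list[str]) -> list[str]:
--     """Strip, deduplicate, drop blanks, enforce max length.
--
--     Extract-and-filter algorithm: take the first pending stripped value,
--     then delete every later duplicate of it from the pending worklist, so
--     no auxiliary seen-set is ever needed.
--     """
--     pending = [v.strip() for v in values]
--     out: list[str] = []
--     while pending:
--         value, pending = pending[0], pending[1:]
--         if not value:
--             continue
--         if len(value) > 50:
--             raise_form_error("Abbreviations must be 50 characters or fewer.")
--         out.append(value)
--         pending = [r for r in pending if r != value]
--     return out
-- ===== Notes on version B (the rewrite author's own statement) =====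
-- stated objective: alternative
-- what changed: Replaces A's single seen-set pass by an extract-and-filter worklist algorithm: strip everything up front, then repeatedly take the first pending value and delete all of its later duplicates from the worklist, so deduplication happens by rewriting the remaining input instead of by a membership set.
import Mathlib
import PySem

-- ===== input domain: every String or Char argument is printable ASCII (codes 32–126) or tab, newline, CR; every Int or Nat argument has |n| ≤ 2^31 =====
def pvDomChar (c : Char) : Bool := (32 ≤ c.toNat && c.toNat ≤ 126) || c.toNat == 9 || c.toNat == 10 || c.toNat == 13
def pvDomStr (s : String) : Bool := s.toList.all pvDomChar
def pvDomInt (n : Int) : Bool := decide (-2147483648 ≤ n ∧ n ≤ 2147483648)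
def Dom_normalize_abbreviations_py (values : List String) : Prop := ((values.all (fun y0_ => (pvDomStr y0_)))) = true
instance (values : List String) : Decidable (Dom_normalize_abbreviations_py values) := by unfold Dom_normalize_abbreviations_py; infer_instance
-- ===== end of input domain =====

-- B replaces A's single seen-set pass by an extract-and-filter worklist: strip all
-- values up front, then repeatedly take the first pending value and delete its later
-- duplicates from the worklist (no seen set); objective: alternative.


-- ===== PORT A =====
-- A's loop, step for step: strip, skip blanks, length check (raise = none),
-- skip seen values, else append to `normalized` and add to `seen`.
def normAbbrevLoopA (values : List String) (normalized : List String)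
    (seen : PySem.Set String) : Option (List String) :=
  match values with
  | [] => some normalized
  | raw_value :: rest =>
    let value := PySem.Str.strip raw_value
    if value = "" then normAbbrevLoopA rest normalized seen
    else if 50 < PySem.Str.len value then none   -- raise_form_error(...)
    else if PySem.Set.contains seen value then normAbbrevLoopA rest normalized seen
    else normAbbrevLoopA rest (normalized ++ [value]) (PySem.Set.add seen value)

-- the raise path (none) is excluded by Pre_; outside it we return [] for totality
def normalize_abbreviations_py (values : List String) : List String :=
  (normAbbrevLoopA values [] PySem.Set.empty).getD []

-- ===== PORT B =====
-- B's while loop over the `pending` worklist: pop the head, skip blanks, length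
-- check (raise = none), append to `out`, then filter the head's duplicates out
-- of `pending`.
def normAbbrevLoopB (pending : List String) (out : List String) : Option (List String) :=
  match pending with
  | [] => some out
  | value :: rest =>
    if value = "" then normAbbrevLoopB rest out
    else if 50 < PySem.Str.len value then none   -- raise_form_error(...)
    else normAbbrevLoopB (rest.filter (fun r => !(r == value))) (out ++ [value])
termination_by pending.length
decreasing_by
  all_goals simp [List.length_unattach]
  all_goals exact le_trans (List.length_filter_le _ _) (by simp)

def normalize_abbreviations_py_alt (values : List String) : List String :=
  (normAbbrevLoopB (values.map PySem.Str.strip) []).getD []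

-- ===== PRECONDITION & SPEC =====
-- Pre_ excludes exactly the inputs on which A raises StructuredValidationError
-- (some value strips to more than 50 characters).
def Pre_normalize_abbreviations_py (values : List String) : Prop :=
  ∀ v ∈ values, PySem.Str.len (PySem.Str.strip v) ≤ 50

instance (values : List String) : Decidable (Pre_normalize_abbreviations_py values) := by
  unfold Pre_normalize_abbreviations_py; infer_instance

def pvWitness_normalize_abbreviations_py : List String := ["  abc ", "abc", "", "def"]

def Spec_normalize_abbreviations_py (values : List String) (out : List String) : Prop := out = normalize_abbreviations_py_alt values
instance (values : List String) (out : List String) : Decidable (Spec_normalize_abbreviations_py values out) := by unfold Spec_normalize_abbreviations_py; infer_instance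

-- ===== CLAIM (what is proved, stated in full; the proofs are below) =====
def Claim_equal_normalize_abbreviations_py : Prop := ∀ (values : List String), Dom_normalize_abbreviations_py values → Pre_normalize_abbreviations_py values → Spec_normalize_abbreviations_py values (normalize_abbreviations_py values)

-- ===== LEMMAS AND PROOFS =====

-- once v is in the accumulator, deleting v's occurrences from the list does not
-- change the fold of Set.add
lemma foldl_set_add_filter_ne (l : List String) (s : PySem.Set String) {v : String}
    (hv : v ∈ s) :
    (l.filter (fun r => !(r == v))).foldl PySem.Set.add s = l.foldl PySem.Set.add s := by
  induction l generalizing s with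
  | nil => rfl
  | cons a rest ih =>
    by_cases hav : a = v
    · subst hav
      simp [PySem.Set.add, hv, ih _ hv]
    · have hv' : v ∈ PySem.Set.add s a := by
        by_cases h : a ∈ s <;> simp [PySem.Set.add, h, hv]
      rw [List.filter_cons, if_pos (by simp [hav]), List.foldl_cons, List.foldl_cons,
        ih _ hv']

-- B's worklist loop computes the Set.add fold of the non-blank entries, provided
-- no non-blank pending value is already in the accumulator (true from the start).
lemma normAbbrevLoopB_eq_foldl (pending : List String) (out : List String)
    (hlen : ∀ v ∈ pending, v ≠ "" → PySem.Str.len v ≤ 50)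
    (hout : ∀ v ∈ pending, v ≠ "" → v ∉ out) :
    normAbbrevLoopB pending out =
      some ((pending.filter (fun v => !(v == ""))).foldl PySem.Set.add out) := by
  induction hn : pending.length using Nat.strong_induction_on generalizing pending out with
  | _ n ih =>
    match pending, hn with
    | [], _ => simp [normAbbrevLoopB]
    | value :: rest, hn =>
      by_cases hblank : value = ""
      · subst hblank
        rw [normAbbrevLoopB, if_pos rfl]
        have := ih rest.length (by simp [← hn]) rest out
          (fun v hv => hlen v (by simp [hv])) (fun v hv => hout v (by simp [hv])) rfl
        simpa [List.filter] using this
      · have h50 : ¬ 50 < PySem.Str.len value := not_lt.mpr (hlen value (by simp) hblank)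
        rw [normAbbrevLoopB, if_neg hblank, if_neg h50]
        have hvout : value ∉ out := hout value (by simp) hblank
        have hrec := ih (rest.filter (fun r => !(r == value))).length
          (by simp [← hn]; exact List.length_filter_le _ _)
          (rest.filter (fun r => !(r == value))) (out ++ [value])
          (by intro v hv hvne; exact hlen v (by simp [List.mem_filter.mp hv |>.1]) hvne)
          (by
            intro v hv hvne
            rcases List.mem_filter.mp hv with ⟨hvr, hne⟩
            simp only [Bool.not_eq_true', beq_eq_false_iff_ne] at hne
            simp [hout v (by simp [hvr]) hvne, hne]) rfl
        rw [hrec]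
        congr 1
        have hadd : PySem.Set.add out value = out ++ [value] := by
          simp [PySem.Set.add, PySem.Set.contains, hvout]
        have hvin : value ∈ out ++ [value] := by simp
        calc ((rest.filter (fun r => !(r == value))).filter (fun v => !(v == ""))).foldl
              PySem.Set.add (out ++ [value])
            = ((rest.filter (fun v => !(v == ""))).filter (fun r => !(r == value))).foldl
              PySem.Set.add (out ++ [value]) := by
              rw [List.filter_filter, List.filter_filter,
                List.filter_congr (fun x _ => Bool.and_comm (!x == "") (!x == value))]
          _ = (rest.filter (fun v => !(v == ""))).foldl PySem.Set.add (out ++ [value]) :=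
              foldl_set_add_filter_ne _ _ hvin
          _ = ((value :: rest).filter (fun v => !(v == ""))).foldl PySem.Set.add out := by
              rw [List.filter_cons, if_pos (by simp [hblank]), List.foldl_cons, hadd]

-- A's loop, run with seen = normalized (the invariant it maintains from the empty
-- start), folds Set.add of each stripped non-blank value onto the accumulator.
lemma normAbbrevLoopA_diag (values : List String) (acc : List String)
    (hpre : ∀ v ∈ values, PySem.Str.len (PySem.Str.strip v) ≤ 50) :
    normAbbrevLoopA values acc acc =
      some (((values.map PySem.Str.strip).filter (fun v => !(v == ""))).foldl PySem.Set.add acc) := by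
  induction values generalizing acc with
  | nil => simp [normAbbrevLoopA]
  | cons raw rest ih =>
    have hlenc : (PySem.Chars.strip raw.toList).length ≤ 50 := by
      have h := hpre raw (by simp)
      simp [pysem] at h; exact_mod_cast h
    have hrest : ∀ v ∈ rest, PySem.Str.len (PySem.Str.strip v) ≤ 50 := by
      intro v hv; exact hpre v (by simp [hv])
    by_cases hblank : PySem.Str.strip raw = ""
    · simp [normAbbrevLoopA, hblank, ih _ hrest]
    · by_cases hmem : PySem.Str.strip raw ∈ acc
      · simp [normAbbrevLoopA, PySem.Set.add, hblank, hlenc, hmem, ih _ hrest]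
      · simp [normAbbrevLoopA, PySem.Set.add, hblank, hlenc, hmem, ih _ hrest]

-- ===== VERDICT (by name: the statement is the Claim_ definition above) =====
theorem normalize_abbreviations_py_spec : Claim_equal_normalize_abbreviations_py := by
  intro values _hdom hpre
  unfold Spec_normalize_abbreviations_py normalize_abbreviations_py normalize_abbreviations_py_alt
  rw [show (PySem.Set.empty : PySem.Set String) = [] from rfl,
    normAbbrevLoopA_diag values [] hpre,
    normAbbrevLoopB_eq_foldl (values.map PySem.Str.strip) []
      (by rintro v hv -; rcases List.mem_map.mp hv with ⟨w, hw, rfl⟩; exact hpre w hw)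
      (by simp)]
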